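-- pv_equiv track=rewrite | github.com/sancelot/AIdevSquad | tools/python_refactoring.py | _get_indentation_level
-- ===== SOURCE A (Python) =====
-- def _get_indentation_level(line: str) -> str:
--     """
--     Get the indentation of a specific line.
--
--     Args:
--         line: The line to analyze
--
--     Returns:
--         The indentation string for that line
--     """
--     indent = ''
--     for char in line:
--         if char in ' \t':
--             indent += char
--         else:
--             break
--     return indent
-- ===== SOURCE B (Python) =====
-- def _get_indentation_level(line: str) -> str:
--     stripped = line.lstrip(' \t')
--     return line[:len(line) - len(stripped)]
-- ===== Notes on version B (the rewrite author's own statement) =====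
-- stated objective: idiomatic
-- what changed: B replaces the explicit char-by-char accumulation loop with the builtin lstrip of spaces and tabs, then slices the removed prefix back out of the line.
import Mathlib
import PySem

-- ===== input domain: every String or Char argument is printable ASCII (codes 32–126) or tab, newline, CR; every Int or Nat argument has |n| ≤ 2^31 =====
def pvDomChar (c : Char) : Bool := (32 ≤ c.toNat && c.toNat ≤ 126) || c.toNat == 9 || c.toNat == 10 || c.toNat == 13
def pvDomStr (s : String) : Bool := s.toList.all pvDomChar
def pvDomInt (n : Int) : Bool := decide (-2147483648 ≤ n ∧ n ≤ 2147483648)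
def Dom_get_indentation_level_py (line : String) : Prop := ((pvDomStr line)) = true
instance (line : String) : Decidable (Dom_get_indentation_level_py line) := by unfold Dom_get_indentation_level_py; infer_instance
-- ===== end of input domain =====

-- B replaces A's explicit char-accumulation loop with lstrip(' \t') + a prefix slice (idiomatic).

-- ===== PORT A =====
-- the for-loop with break: accumulate chars in ' \t' until a non-member stops the loop
def pvIndentLoopA : String → List Char → String
  | indent, [] => indent
  | indent, c :: rest =>
      if c == ' ' || c == '\t' then pvIndentLoopA (indent.push c) rest else indent

def get_indentation_level_py (line : String) : String :=
  pvIndentLoopA "" line.toList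

-- ===== PORT B =====
-- line.lstrip(' \t') ported by hand as dropWhile over the char set (exact for a chars argument);
-- line[:len(line)-len(stripped)] is PySem.List.slice on the code points
def get_indentation_level_py_alt (line : String) : String :=
  let stripped : List Char := line.toList.dropWhile (fun c => c == ' ' || c == '\t')
  String.ofList (PySem.List.slice line.toList none
    (some ((line.toList.length : Int) - (stripped.length : Int))))

-- ===== PRECONDITION & SPEC =====
def Spec_get_indentation_level_py (line : String) (out : String) : Prop := out = get_indentation_level_py_alt line
instance (line : String) (out : String) : Decidable (Spec_get_indentation_level_py line out) := by unfold Spec_get_indentation_level_py; infer_instance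

-- ===== CLAIM (what is proved, stated in full; the proofs are below) =====
def Claim_equal_get_indentation_level_py : Prop := ∀ (line : String), Dom_get_indentation_level_py line → Spec_get_indentation_level_py line (get_indentation_level_py line)

-- ===== LEMMAS AND PROOFS =====

-- A's loop appends the takeWhile prefix to the accumulator
theorem pvIndentLoopA_eq (acc : String) (l : List Char) :
    pvIndentLoopA acc l = String.ofList (acc.toList ++ l.takeWhile (fun c => c == ' ' || c == '\t')) := by
  induction l generalizing acc with
  | nil => simp [pvIndentLoopA]
  | cons c rest ih =>
    by_cases h : (c == ' ' || c == '\t') = true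
    · simp [pvIndentLoopA, h, ih]
    · simp only [Bool.not_eq_true] at h
      simp [pvIndentLoopA, h]

theorem get_indentation_level_py_spec : Claim_equal_get_indentation_level_py := by
  intro line _
  unfold Spec_get_indentation_level_py get_indentation_level_py get_indentation_level_py_alt
  rw [pvIndentLoopA_eq]
  have hsplit : (line.toList.takeWhile (fun c => c == ' ' || c == '\t')).length
      + (line.toList.dropWhile (fun c => c == ' ' || c == '\t')).length = line.toList.length := by
    rw [← List.length_append, List.takeWhile_append_dropWhile]
  have hlen : (line.length : Int) -
      ((line.toList.dropWhile (fun c => c == ' ' || c == '\t')).length : Int)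
      = ((line.toList.takeWhile (fun c => c == ' ' || c == '\t')).length : Int) := by
    rw [← String.length_toList]
    omega
  have hp : (line.toList.takeWhile (fun c => c == ' ' || c == '\t')) <+: line.toList :=
    List.takeWhile_prefix _
  simp only [String.length_toList] at hlen ⊢
  rw [hlen, PySem.List.slice_to_natCast, ← List.prefix_iff_eq_take.mp hp]
  simp
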